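-- pv_equiv track=rewrite | github.com/wlockiv/adventofcode2020 | adventofcode/2021/day06a.py | be_fruitful
-- ===== SOURCE A (Python) =====
-- from typing import IO, List, Dict, Type
--
-- TimerCounts = Dict[str, int]
--
-- def be_fruitful(starting_timers: List[str], ticks=80) -> int:
--     current_values: List[str] = starting_timers.copy()
--     timer_counts: TimerCounts = {
--         str(k): current_values.count(str(k)) for k in range(9)}
--
--     for _ in range(ticks):
--         next_counts: TimerCounts = {
--             '0': timer_counts['1'],
--             '1': timer_counts['2'],
--             '2': timer_counts['3'],
--             '3': timer_counts['4'],
--             '4': timer_counts['5'],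
--             '5': timer_counts['6'],
--             '6': timer_counts['7'] + timer_counts['0'],
--             '7': timer_counts['8'],
--             '8': timer_counts['0']
--         }
--
--         timer_counts = next_counts
--
--     return sum(timer_counts.values())
-- ===== SOURCE B (Python) =====
-- _M = [
--     [0, 1, 0, 0, 0, 0, 0, 0, 0],
--     [0, 0, 1, 0, 0, 0, 0, 0, 0],
--     [0, 0, 0, 1, 0, 0, 0, 0, 0],
--     [0, 0, 0, 0, 1, 0, 0, 0, 0],
--     [0, 0, 0, 0, 0, 1, 0, 0, 0],
--     [0, 0, 0, 0, 0, 0, 1, 0, 0],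
--     [1, 0, 0, 0, 0, 0, 0, 1, 0],
--     [0, 0, 0, 0, 0, 0, 0, 0, 1],
--     [1, 0, 0, 0, 0, 0, 0, 0, 0],
-- ]
--
--
-- def _mat_mul(A, B):
--     return [[sum(A[i][k] * B[k][j] for k in range(9)) for j in range(9)]
--             for i in range(9)]
--
--
-- def _mat_pow(M, n):
--     R = [[1 if i == j else 0 for j in range(9)] for i in range(9)]
--     while n > 0:
--         if n % 2 == 1:
--             R = _mat_mul(R, M)
--         M = _mat_mul(M, M)
--         n //= 2
--     return R
--
--
-- def be_fruitful(starting_timers, ticks=80):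
--     counts = [starting_timers.count(str(k)) for k in range(9)]
--     P = _mat_pow(_M, ticks)
--     return sum(P[i][j] * counts[j] for i in range(9) for j in range(9))
-- ===== Notes on version B (the rewrite author's own statement) =====
-- stated objective: alternative
-- what changed: B replaces A's tick-by-tick dictionary simulation with binary exponentiation of the 9x9 lanternfish transition matrix applied to the initial count vector.
import Mathlib
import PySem

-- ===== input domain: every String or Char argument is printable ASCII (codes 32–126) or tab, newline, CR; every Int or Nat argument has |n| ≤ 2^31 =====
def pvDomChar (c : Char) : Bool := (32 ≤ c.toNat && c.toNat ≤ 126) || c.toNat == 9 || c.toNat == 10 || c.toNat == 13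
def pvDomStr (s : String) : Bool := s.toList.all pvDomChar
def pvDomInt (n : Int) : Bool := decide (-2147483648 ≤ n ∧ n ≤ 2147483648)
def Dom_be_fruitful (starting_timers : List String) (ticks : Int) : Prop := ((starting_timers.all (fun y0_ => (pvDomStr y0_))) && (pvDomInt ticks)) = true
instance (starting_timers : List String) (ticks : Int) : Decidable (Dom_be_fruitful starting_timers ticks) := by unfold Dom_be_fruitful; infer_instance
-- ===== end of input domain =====

-- B replaces A's tick-by-tick dictionary simulation with binary exponentiation of the
-- 9x9 transition matrix (alternative algorithm; not measurably faster at tested sizes).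

-- ===== PORT A =====
-- one loop iteration: the dict literal built from the previous counts
-- (keys '0'..'8' are always present, so Python's d[k] never raises; getD's default is never used)
def pvStepDictA (tc : PySem.Dict String Int) : PySem.Dict String Int :=
  PySem.Dict.ofList
    [("0", tc.getD "1" 0), ("1", tc.getD "2" 0), ("2", tc.getD "3" 0),
     ("3", tc.getD "4" 0), ("4", tc.getD "5" 0), ("5", tc.getD "6" 0),
     ("6", tc.getD "7" 0 + tc.getD "0" 0), ("7", tc.getD "8" 0), ("8", tc.getD "0" 0)]

def be_fruitful (starting_timers : List String) (ticks : Int) : Int :=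
  let current_values : List String := starting_timers
  let timer_counts : PySem.Dict String Int :=
    (PySem.List.pyRange 0 9 1).foldl
      (fun d k => d.insert (PySem.Int.toStr k)
        ((PySem.List.count current_values (PySem.Int.toStr k) : Int))) PySem.Dict.empty
  let final := (PySem.List.pyRange 0 ticks 1).foldl (fun tc _ => pvStepDictA tc) timer_counts
  (PySem.Dict.values final).sum

-- ===== PORT B =====
-- 9x9 matrices as lists of 9 rows of 9 Ints, exactly python's lists of lists;
-- A[i][j] (indices always 0..8 here, so Python never raises) is:
def pvEntry (A : List (List Int)) (i j : Nat) : Int := (A.getD i []).getD j 0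

def pvMatMulB (A B : List (List Int)) : List (List Int) :=
  (List.range 9).map (fun i => (List.range 9).map (fun j =>
    ((List.range 9).map (fun k => pvEntry A i k * pvEntry B k j)).sum))

def pvMatB : List (List Int) :=
  [[0, 1, 0, 0, 0, 0, 0, 0, 0],
   [0, 0, 1, 0, 0, 0, 0, 0, 0],
   [0, 0, 0, 1, 0, 0, 0, 0, 0],
   [0, 0, 0, 0, 1, 0, 0, 0, 0],
   [0, 0, 0, 0, 0, 1, 0, 0, 0],
   [0, 0, 0, 0, 0, 0, 1, 0, 0],
   [1, 0, 0, 0, 0, 0, 0, 1, 0],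
   [0, 0, 0, 0, 0, 0, 0, 0, 1],
   [1, 0, 0, 0, 0, 0, 0, 0, 0]]

-- _mat_pow's while-loop, as recursion on n (square-and-multiply)
def pvMatPowAux (M R : List (List Int)) (n : Int) : List (List Int) :=
  if _h : n ≤ 0 then R
  else
    pvMatPowAux (pvMatMulB M M)
      (if PySem.Int.mod n 2 = 1 then pvMatMulB R M else R)
      (PySem.Int.floordiv n 2)
termination_by n.toNat
decreasing_by
  rw [PySem.Int.floordiv_eq_ediv_of_pos (by omega)]
  omega

def pvMatPowB (M : List (List Int)) (n : Int) : List (List Int) :=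
  pvMatPowAux M
    ((List.range 9).map (fun i => (List.range 9).map (fun j => if i = j then (1 : Int) else 0)))
    n

def be_fruitful_alt (starting_timers : List String) (ticks : Int) : Int :=
  let counts : List Int :=
    (List.range 9).map
      (fun k => ((PySem.List.count starting_timers (PySem.Int.toStr (k : Int)) : Int)))
  let P := pvMatPowB pvMatB ticks
  ((List.range 9).flatMap
    (fun i => (List.range 9).map (fun j => pvEntry P i j * counts.getD j 0))).sum

-- ===== PRECONDITION & SPEC =====
def Spec_be_fruitful (starting_timers : List String) (ticks : Int) (out : Int) : Prop := out = be_fruitful_alt starting_timers ticks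
instance (starting_timers : List String) (ticks : Int) (out : Int) : Decidable (Spec_be_fruitful starting_timers ticks out) := by unfold Spec_be_fruitful; infer_instance

-- ===== CLAIM (what is proved, stated in full; the proofs are below) =====
def Claim_equal_be_fruitful : Prop := ∀ (starting_timers : List String) (ticks : Int), Dom_be_fruitful starting_timers ticks → Spec_be_fruitful starting_timers ticks (be_fruitful starting_timers ticks)

-- ===== LEMMAS AND PROOFS =====

-- the 9 counts as a vector, and one tick as a linear step on it
def pvVec (st : List String) : Fin 9 → Int :=
  fun j => ((PySem.List.count st (PySem.Int.toStr ((j : Nat) : Int)) : Int))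

def pvStepV (v : Fin 9 → Int) : Fin 9 → Int :=
  ![v 1, v 2, v 3, v 4, v 5, v 6, v 7 + v 0, v 8, v 0]

def pvDictOfVec (v : Fin 9 → Int) : PySem.Dict String Int :=
  PySem.Dict.mk
    [("0", v 0), ("1", v 1), ("2", v 2), ("3", v 3), ("4", v 4),
     ("5", v 5), ("6", v 6), ("7", v 7), ("8", v 8)]

-- a 9x9 list-of-lists matrix, read as a Mathlib matrix
def pvToM (L : List (List Int)) : Matrix (Fin 9) (Fin 9) Int :=
  Matrix.of fun i j => pvEntry L (i : Nat) (j : Nat)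

set_option maxHeartbeats 1000000 in
lemma pvStepDictA_dictOfVec (v : Fin 9 → Int) :
    pvStepDictA (pvDictOfVec v) = pvDictOfVec (pvStepV v) := rfl

lemma pv_foldl_const {α β : Type} (f : β → β) (l : List α) (x : β) :
    l.foldl (fun acc _ => f acc) x = f^[l.length] x := by
  induction l generalizing x with
  | nil => rfl
  | cons a l ih => simp [List.foldl, ih, Function.iterate_succ_apply]

lemma pvEntry_map_range (f : Nat → List Int) (i j : Nat) (h : i < 9) :
    pvEntry ((List.range 9).map f) i j = (f i).getD j 0 := by
  simp [pvEntry, List.getD_eq_getElem?_getD, h]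

set_option maxHeartbeats 1000000 in
lemma pv_sum_flat9 (f : Nat → Nat → Int) :
    ((List.range 9).flatMap (fun i => (List.range 9).map (fun j => f i j))).sum
      = ∑ i : Fin 9, ∑ j : Fin 9, f i j := by
  simp [List.range_succ, Fin.sum_univ_succ]
  ring

lemma pvMatMulB_eq (A B : List (List Int)) :
    pvToM (pvMatMulB A B) = pvToM A * pvToM B := by
  ext i j
  rw [Matrix.mul_apply]
  show pvEntry (pvMatMulB A B) (i : Nat) (j : Nat) = _
  unfold pvMatMulB
  rw [pvEntry_map_range _ _ _ i.isLt]
  have hj : ((List.range 9).map (fun j => ((List.range 9).map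
      (fun k => pvEntry A (i : Nat) k * pvEntry B k j)).sum)).getD (j : Nat) 0
      = ((List.range 9).map (fun k => pvEntry A (i : Nat) k * pvEntry B k (j : Nat))).sum := by
    simp [List.getD_eq_getElem?_getD, j.isLt]
  rw [hj]
  simp [List.range_succ, Fin.sum_univ_succ, pvToM]

lemma pvMatPowAux_eq (n : Int) (M R : List (List Int)) :
    pvToM (pvMatPowAux M R n) = pvToM R * pvToM M ^ n.toNat := by
  induction hn : n.toNat using Nat.strong_induction_on generalizing n M R with
  | _ m ih =>
    by_cases h : n ≤ 0
    · have hm : m = 0 := by omega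
      rw [pvMatPowAux]
      simp [h, hm]
    · have hpos : 0 < n := by omega
      rw [pvMatPowAux]
      simp only [h, dite_false]
      rw [PySem.Int.mod_eq_emod_of_pos (by omega), PySem.Int.floordiv_eq_ediv_of_pos (by omega)]
      have hlt : (n / 2).toNat < m := by omega
      rw [ih _ hlt _ _ _ rfl, pvMatMulB_eq]
      have hsplit : m = 2 * (n / 2).toNat + (n % 2).toNat := by omega
      rcases Int.emod_two_eq_zero_or_one n with h2 | h2
      · have hne : ¬ (n % 2 = 1) := by omega
        simp only [hne, if_false]
        rw [hsplit, h2]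
        rw [pow_add, pow_mul]
        norm_num [sq]
      · simp only [h2, if_true, pvMatMulB_eq]
        rw [hsplit, h2]
        rw [pow_add, pow_mul]
        norm_num [sq, mul_assoc]
        rw [(((Commute.refl (pvToM M)).mul_right (Commute.refl (pvToM M))).pow_right _).eq]

lemma pvIdL_eq :
    pvToM ((List.range 9).map
      (fun i => (List.range 9).map (fun j => if i = j then (1 : Int) else 0))) = 1 := by
  ext i j
  show pvEntry _ (i : Nat) (j : Nat) = _
  rw [pvEntry_map_range _ _ _ i.isLt]
  have hj : ((List.range 9).map (fun k => if (i : Nat) = k then (1 : Int) else 0)).getD (j : Nat) 0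
      = if (i : Nat) = (j : Nat) then (1 : Int) else 0 := by
    simp [List.getD_eq_getElem?_getD, j.isLt]
  rw [hj, Matrix.one_apply]
  simp [Fin.val_inj]

lemma pvMat_mulVec (v : Fin 9 → Int) : (pvToM pvMatB).mulVec v = pvStepV v := by
  funext i
  fin_cases i <;>
    (simp [pvToM, pvEntry, pvMatB, pvStepV, Matrix.mulVec, dotProduct, Fin.sum_univ_succ]; try ring)

lemma pv_pow_mulVec (n : Nat) (v : Fin 9 → Int) :
    (pvToM pvMatB ^ n).mulVec v = pvStepV^[n] v := by
  induction n with
  | zero => simp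
  | succ n ih =>
    rw [Function.iterate_succ_apply', pow_succ']
    rw [← Matrix.mulVec_mulVec, ih, pvMat_mulVec]

set_option maxHeartbeats 1000000 in
theorem pv_main (st : List String) (ticks : Int) :
    be_fruitful st ticks = be_fruitful_alt st ticks := by
  unfold be_fruitful be_fruitful_alt
  dsimp only
  have hinit : (PySem.List.pyRange 0 9 1).foldl
      (fun d k => d.insert (PySem.Int.toStr k) ((PySem.List.count st (PySem.Int.toStr k) : Int)))
      PySem.Dict.empty = pvDictOfVec (pvVec st) := rfl
  rw [hinit, pv_foldl_const pvStepDictA, PySem.List.length_pyRange_one]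
  have hloop : ∀ (n : Nat) (v : Fin 9 → Int),
      pvStepDictA^[n] (pvDictOfVec v) = pvDictOfVec (pvStepV^[n] v) := by
    intro n
    induction n with
    | zero => intro v; rfl
    | succ n ih =>
      intro v
      rw [Function.iterate_succ_apply', Function.iterate_succ_apply', ih,
        pvStepDictA_dictOfVec]
  rw [hloop]
  simp only [Int.sub_zero]
  -- the right-hand side, through the matrix power
  have hP : ∀ i j : Fin 9, pvEntry (pvMatPowB pvMatB ticks) (i : Nat) (j : Nat)
      = (pvToM pvMatB ^ ticks.toNat) i j := by
    intro i j
    exact congrFun (congrFun (by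
      unfold pvMatPowB
      rw [pvMatPowAux_eq, pvIdL_eq, one_mul] :
        pvToM (pvMatPowB pvMatB ticks) = pvToM pvMatB ^ ticks.toNat) i) j
  have hc : ∀ j : Fin 9, (((List.range 9).map
      (fun k => ((PySem.List.count st (PySem.Int.toStr (k : Int)) : Int)))).getD (j : Nat) 0)
      = pvVec st j := by
    intro j
    fin_cases j <;> rfl
  have hB : ((List.range 9).flatMap
      (fun i => (List.range 9).map (fun j => pvEntry (pvMatPowB pvMatB ticks) i j *
        ((List.range 9).map
          (fun k => ((PySem.List.count st (PySem.Int.toStr (k : Int)) : Int)))).getD j 0))).sum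
      = ∑ i, (pvToM pvMatB ^ ticks.toNat).mulVec (pvVec st) i := by
    rw [pv_sum_flat9]
    simp only [hP, hc]
    simp [Matrix.mulVec, dotProduct]
  rw [hB, pv_pow_mulVec]
  set w := pvStepV^[ticks.toNat] (pvVec st) with hwdef
  show (PySem.Dict.values (pvDictOfVec w)).sum = ∑ i, w i
  simp [pvDictOfVec, PySem.Dict.values, Fin.sum_univ_succ]

-- ===== VERDICT (by name: the statement is the Claim_ definition above) =====
theorem be_fruitful_spec : Claim_equal_be_fruitful := by
  intro st ticks _
  unfold Spec_be_fruitful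
  exact pv_main st ticks
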